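-- pv_equiv track=rewrite | github.com/LuffarLeif/AoC2025 | Day2.py | generate_invalid_ids
-- ===== SOURCE A (Python) =====
-- def generate_invalid_ids(max_end):
--
--     max_len = len(str(max_end))
--     invalid_ids = set()
--
--     for base_len in range(1, max_len + 1):
--         t_max = max_len // base_len
--         if t_max < 2:
--             continue  # cant repeat at least twice
--
--         start_x = 10 ** (base_len - 1)      # no leading zeros
--         end_x = 10 ** base_len - 1
--         power = 10 ** base_len              # used for numeric concatenation
--
--         for x in range(start_x, end_x + 1):
--             v = x
--             for t in range(2, t_max + 1):
--                 # v becomes x repeated t times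
--                 v = v * power + x
--                 total_len = base_len * t
--
--                 if total_len < max_len:
--                     # Any number with fewer digits than max_end is <= max_end
--                     invalid_ids.add(v)
--                 elif total_len == max_len:
--                     if v <= max_end:
--                         invalid_ids.add(v)
--                 else:
--                     break
--
--     return sorted(invalid_ids)
-- ===== SOURCE B (Python) =====
-- def generate_invalid_ids(max_end):
--     # Iterate by total length and block-size divisor; the repeated number is a
--     # single closed-form product x * repeater, hoisted out of the x-loop.
--     max_len = len(str(max_end))
--     invalid = set()
--     for total_len in range(2, max_len + 1):
--         for d in range(1, total_len // 2 + 1):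
--             if total_len % d == 0:
--                 rep = (10 ** total_len - 1) // (10 ** d - 1)  # 100..0100..01 repeater
--                 for x in range(10 ** (d - 1), 10 ** d):
--                     c = x * rep
--                     if total_len < max_len or c <= max_end:
--                         invalid.add(c)
--     return sorted(invalid)
-- ===== Notes on version B (the rewrite author's own statement) =====
-- stated objective: alternative
-- what changed: B enumerates candidates by total length and block-size divisor and builds each repeated number as one closed-form product x*((10^L-1)/(10^d-1)) hoisted out of the inner loop, instead of A's per-t numeric accumulator v=v*power+x with a three-way length branch and dead break.
import Mathlib
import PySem

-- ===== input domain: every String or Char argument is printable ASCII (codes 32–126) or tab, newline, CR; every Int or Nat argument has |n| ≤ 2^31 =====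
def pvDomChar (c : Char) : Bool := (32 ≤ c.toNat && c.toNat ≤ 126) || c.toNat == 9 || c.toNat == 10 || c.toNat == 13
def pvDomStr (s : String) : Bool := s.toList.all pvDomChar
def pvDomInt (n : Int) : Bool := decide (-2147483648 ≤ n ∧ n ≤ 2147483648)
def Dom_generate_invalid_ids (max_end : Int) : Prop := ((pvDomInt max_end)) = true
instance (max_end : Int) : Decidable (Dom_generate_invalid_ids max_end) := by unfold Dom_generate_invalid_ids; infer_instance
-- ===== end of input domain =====

-- B enumerates by total length and block-size divisor with a closed-form repeater product
-- instead of A's per-t accumulator and three-way length branch: an alternative decomposition.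

-- ===== PORT A =====
-- the innermost 'for t in range(2, t_max+1)' loop of A, with its running v and its break
def pvInnerT (power max_len base_len x max_end : Int) :
    List Int → Int → PySem.Set Int → PySem.Set Int
  | [], _, S => S
  | t :: rest, v, S =>
    let v' := v * power + x
    let total_len := base_len * t
    if total_len < max_len then
      pvInnerT power max_len base_len x max_end rest v' (PySem.Set.add S v')
    else if total_len = max_len then
      pvInnerT power max_len base_len x max_end rest v'
        (if v' ≤ max_end then PySem.Set.add S v' else S)
    else S  -- break

-- A's outer loops over base_len and x
def pvAloop (max_end max_len : Int) : PySem.Set Int :=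
  (PySem.List.pyRange 1 (max_len + 1) 1).foldl (fun S base_len =>
    let t_max := PySem.Int.floordiv max_len base_len
    if t_max < 2 then S  -- cant repeat at least twice
    else
      let start_x := (10 : Int) ^ (base_len - 1).toNat  -- no leading zeros
      let end_x := (10 : Int) ^ base_len.toNat - 1
      let power := (10 : Int) ^ base_len.toNat          -- numeric concatenation
      (PySem.List.pyRange start_x (end_x + 1) 1).foldl (fun S x =>
        pvInnerT power max_len base_len x max_end
          (PySem.List.pyRange 2 (t_max + 1) 1) x S) S) PySem.Set.empty

def generate_invalid_ids (max_end : Int) : List Int :=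
  let max_len : Int := PySem.Str.len (PySem.Int.toStr max_end)
  PySem.List.sorted (pvAloop max_end max_len) (fun y => y) false

-- ===== PORT B =====
-- B's loops over total_len, divisor d and x
def pvBloop (max_end max_len : Int) : PySem.Set Int :=
  (PySem.List.pyRange 2 (max_len + 1) 1).foldl (fun S total_len =>
    (PySem.List.pyRange 1 (PySem.Int.floordiv total_len 2 + 1) 1).foldl (fun S d =>
      if PySem.Int.mod total_len d = 0 then
        let rep := PySem.Int.floordiv ((10 : Int) ^ total_len.toNat - 1)
                     ((10 : Int) ^ d.toNat - 1)  -- 100..0100..01 repeater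
        (PySem.List.pyRange ((10 : Int) ^ (d - 1).toNat) ((10 : Int) ^ d.toNat) 1).foldl
          (fun S x =>
            let c := x * rep
            if total_len < max_len ∨ c ≤ max_end then PySem.Set.add S c else S) S
      else S) S) PySem.Set.empty

def generate_invalid_ids_alt (max_end : Int) : List Int :=
  let max_len : Int := PySem.Str.len (PySem.Int.toStr max_end)
  PySem.List.sorted (pvBloop max_end max_len) (fun y => y) false

-- ===== PRECONDITION & SPEC =====
def Spec_generate_invalid_ids (max_end : Int) (out : List Int) : Prop := out = generate_invalid_ids_alt max_end
instance (max_end : Int) (out : List Int) : Decidable (Spec_generate_invalid_ids max_end out) := by unfold Spec_generate_invalid_ids; infer_instance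

-- ===== CLAIM (what is proved, stated in full; the proofs are below) =====
def Claim_equal_generate_invalid_ids : Prop := ∀ (max_end : Int), Dom_generate_invalid_ids max_end → Spec_generate_invalid_ids max_end (generate_invalid_ids max_end)

-- ===== LEMMAS AND PROOFS =====

-- geometric repeater: geomS p t = 1 + p + … + p^(t-1)
def geomS (p : Int) : ℕ → Int
  | 0 => 0
  | n + 1 => geomS p n * p + 1

-- the common membership characterisation of both accumulated sets
def PGood (max_end max_len y : Int) : Prop :=
  ∃ d t x : Int, 1 ≤ d ∧ 2 ≤ t ∧ d * t ≤ max_len ∧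
    (10 : Int) ^ (d - 1).toNat ≤ x ∧ x < (10 : Int) ^ d.toNat ∧
    y = x * geomS ((10 : Int) ^ d.toNat) t.toNat ∧
    (d * t < max_len ∨ y ≤ max_end)

theorem geomS_mul_sub_one (p : Int) (n : ℕ) : geomS p n * (p - 1) = p ^ n - 1 := by
  induction n with
  | zero => simp [geomS]
  | succ n ih =>
    have h : geomS p (n + 1) * (p - 1) = (geomS p n * (p - 1)) * p + (p - 1) := by
      simp only [geomS]; ring
    rw [h, ih]; ring

-- generic membership lemma for a fold that only adds elements
theorem mem_foldl_iff {α : Type} (f : PySem.Set Int → α → PySem.Set Int)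
    (Q : α → Prop) (y : Int) :
    ∀ (l : List α) (S : PySem.Set Int),
      (∀ S' i, i ∈ l → (y ∈ f S' i ↔ y ∈ S' ∨ Q i)) →
      (y ∈ l.foldl f S ↔ y ∈ S ∨ ∃ i ∈ l, Q i) := by
  intro l
  induction l with
  | nil => simp
  | cons a l ih =>
    intro S hf
    simp only [List.foldl_cons]
    rw [ih _ (fun S' i hi => hf S' i (List.mem_cons_of_mem a hi)),
        hf S a (List.mem_cons_self)]
    simp only [List.mem_cons]
    constructor
    · rintro ((h | h) | ⟨i, hi, hq⟩)
      · exact Or.inl h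
      · exact Or.inr ⟨a, Or.inl rfl, h⟩
      · exact Or.inr ⟨i, Or.inr hi, hq⟩
    · rintro (h | ⟨i, rfl | hi, hq⟩)
      · exact Or.inl (Or.inl h)
      · exact Or.inl (Or.inr hq)
      · exact Or.inr ⟨i, hi, hq⟩

-- generic nodup preservation for such folds
theorem nodup_foldl {α : Type} (f : PySem.Set Int → α → PySem.Set Int) (l : List α)
    (h : ∀ S i, S.Nodup → (f S i).Nodup) :
    ∀ (S : PySem.Set Int), S.Nodup → (l.foldl f S).Nodup := by
  induction l with
  | nil => intro S hS; simpa using hS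
  | cons a l ih => intro S hS; exact ih _ (h S a hS)

theorem pvInnerT_nodup (power max_len base_len x max_end : Int) :
    ∀ (ts : List Int) (v : Int) (S : PySem.Set Int), S.Nodup →
      (pvInnerT power max_len base_len x max_end ts v S).Nodup := by
  intro ts
  induction ts with
  | nil => intro v S hS; simpa [pvInnerT] using hS
  | cons t rest ih =>
    intro v S hS
    simp only [pvInnerT]
    split_ifs <;>
      first
      | exact ih _ (PySem.Set.add S _) (PySem.Set.nodup_add S _ hS)
      | exact ih _ _ hS
      | exact hS

-- membership through A's innermost t-loop (the break is unreachable for t ≤ t_max)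
theorem pvInnerT_mem (p max_len d x max_end t_max : Int) (hd : 1 ≤ d)
    (htm : t_max = PySem.Int.floordiv max_len d) :
    ∀ (n : ℕ) (t0 : Int), (t_max + 1 - t0).toNat = n → 2 ≤ t0 →
    ∀ (v : Int), v = x * geomS p (t0 - 1).toNat →
    ∀ (S : PySem.Set Int) (y : Int),
      (y ∈ pvInnerT p max_len d x max_end (PySem.List.pyRange t0 (t_max + 1) 1)
            v S ↔
        y ∈ S ∨ ∃ t : Int, t0 ≤ t ∧ t ≤ t_max ∧ y = x * geomS p t.toNat ∧
          (d * t < max_len ∨ y ≤ max_end)) := by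
  intro n
  induction n with
  | zero =>
    intro t0 hn ht0 v hv S y
    have hnil : PySem.List.pyRange t0 (t_max + 1) 1 = [] :=
      PySem.List.pyRange_one_eq_nil (by omega)
    rw [hnil]
    simp only [pvInnerT]
    constructor
    · exact Or.inl
    · rintro (h | ⟨t, h1, h2, _⟩)
      · exact h
      · omega
  | succ n ih =>
    intro t0 hn ht0 v hv S y
    subst hv
    have hlt : t0 < t_max + 1 := by omega
    rw [PySem.List.pyRange_one_cons hlt]
    have hdpos : (0 : Int) < d := by omega
    have hle : d * t0 ≤ max_len := by
      have := (PySem.Int.le_floordiv_iff_mul_le (a := max_len) (b := d) (q := t0) hdpos).mp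
        (by omega)
      linarith
    have hv' : x * geomS p (t0 - 1).toNat * p + x = x * geomS p t0.toNat := by
      have h1 : t0.toNat = (t0 - 1).toNat + 1 := by omega
      rw [h1]; simp only [geomS]; ring
    have hv2 : x * geomS p t0.toNat = x * geomS p ((t0 + 1) - 1).toNat := by
      norm_num
    have hrec : ∀ S' : PySem.Set Int,
        y ∈ pvInnerT p max_len d x max_end (PySem.List.pyRange (t0 + 1) (t_max + 1) 1)
            (x * geomS p t0.toNat) S' ↔
          y ∈ S' ∨ ∃ t : Int, t0 + 1 ≤ t ∧ t ≤ t_max ∧ y = x * geomS p t.toNat ∧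
            (d * t < max_len ∨ y ≤ max_end) := by
      intro S'
      exact ih (t0 + 1) (by omega) (by omega) _ hv2 S' y
    have hsplit : (∃ t : Int, t0 ≤ t ∧ t ≤ t_max ∧ y = x * geomS p t.toNat ∧
          (d * t < max_len ∨ y ≤ max_end)) ↔
        ((y = x * geomS p t0.toNat ∧ (d * t0 < max_len ∨ y ≤ max_end)) ∨
          ∃ t : Int, t0 + 1 ≤ t ∧ t ≤ t_max ∧ y = x * geomS p t.toNat ∧
            (d * t < max_len ∨ y ≤ max_end)) := by
      constructor
      · rintro ⟨t, h1, h2, h3, h4⟩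
        rcases eq_or_lt_of_le h1 with rfl | h
        · exact Or.inl ⟨h3, h4⟩
        · exact Or.inr ⟨t, by omega, h2, h3, h4⟩
      · rintro (⟨h3, h4⟩ | ⟨t, h1, h2, h3, h4⟩)
        · exact ⟨t0, le_refl _, by omega, h3, h4⟩
        · exact ⟨t, by omega, h2, h3, h4⟩
    simp only [pvInnerT, hv']
    rcases lt_or_eq_of_le hle with hcase | hcase
    · rw [if_pos hcase, hrec, PySem.Set.mem_add]
      rw [hsplit]
      constructor
      · rintro ((h | h) | h)
        · exact Or.inl h
        · exact Or.inr (Or.inl ⟨h, Or.inl hcase⟩)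
        · exact Or.inr (Or.inr h)
      · rintro (h | (⟨h3, _⟩ | h))
        · exact Or.inl (Or.inl h)
        · exact Or.inl (Or.inr h3)
        · exact Or.inr h
    · rw [if_neg (by omega), if_pos hcase, hsplit]
      by_cases hv : x * geomS p t0.toNat ≤ max_end
      · rw [if_pos hv, hrec, PySem.Set.mem_add]
        constructor
        · rintro ((h | h) | h)
          · exact Or.inl h
          · exact Or.inr (Or.inl ⟨h, Or.inr (h ▸ hv)⟩)
          · exact Or.inr (Or.inr h)
        · rintro (h | (⟨h3, _⟩ | h))
          · exact Or.inl (Or.inl h)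
          · exact Or.inl (Or.inr h3)
          · exact Or.inr h
      · rw [if_neg hv, hrec]
        constructor
        · rintro (h | h)
          · exact Or.inl h
          · exact Or.inr (Or.inr h)
        · rintro (h | (⟨h3, h4⟩ | h))
          · exact Or.inl h
          · exfalso
            rcases h4 with h4 | h4
            · omega
            · exact hv (h3 ▸ h4)
          · exact Or.inr h

-- the closed-form repeater equals the geometric sum
theorem rep_eq (d t : Int) (hd : 1 ≤ d) (ht : 0 ≤ t) :
    PySem.Int.floordiv ((10 : Int) ^ (d * t).toNat - 1) ((10 : Int) ^ d.toNat - 1) =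
      geomS ((10 : Int) ^ d.toNat) t.toNat := by
  obtain ⟨dn, rfl⟩ : ∃ dn : ℕ, d = (dn : Int) := ⟨d.toNat, (Int.toNat_of_nonneg (by omega)).symm⟩
  obtain ⟨tn, rfl⟩ : ∃ tn : ℕ, t = (tn : Int) := ⟨t.toNat, (Int.toNat_of_nonneg ht).symm⟩
  have hmul : ((dn : Int) * (tn : Int)).toNat = dn * tn := by
    rw [← Nat.cast_mul, Int.toNat_natCast]
  rw [hmul, Int.toNat_natCast, Int.toNat_natCast]
  have hq : (10 : Int) ^ 1 ≤ (10 : Int) ^ dn := by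
    apply pow_le_pow_right₀ (by norm_num) (by omega)
  have hpos : (0 : Int) < (10 : Int) ^ dn - 1 := by
    simp at hq; omega
  have hgeom : (10 : Int) ^ (dn * tn) - 1 = ((10 : Int) ^ dn - 1) * geomS ((10 : Int) ^ dn) tn := by
    rw [pow_mul, ← geomS_mul_sub_one ((10 : Int) ^ dn) tn]; ring
  rw [hgeom, PySem.Int.floordiv_eq_ediv_of_pos hpos, Int.mul_ediv_cancel_left _ (by omega)]

theorem memA (max_end max_len y : Int) :
    y ∈ pvAloop max_end max_len ↔ PGood max_end max_len y := by
  unfold pvAloop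
  rw [mem_foldl_iff _ (fun d => ∃ t x : Int, 2 ≤ t ∧ t ≤ PySem.Int.floordiv max_len d ∧
        (10 : Int) ^ (d - 1).toNat ≤ x ∧ x < (10 : Int) ^ d.toNat ∧
        y = x * geomS ((10 : Int) ^ d.toNat) t.toNat ∧
        (d * t < max_len ∨ y ≤ max_end)) y]
  · constructor
    · rintro (h | ⟨d, hd, t, x, h2, h3, h4, h5, h6, h7⟩)
      · simp [PySem.Set.empty] at h
      · rw [PySem.List.mem_pyRange_one] at hd
        refine ⟨d, t, x, by omega, h2, ?_, h4, h5, h6, h7⟩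
        have := (PySem.Int.le_floordiv_iff_mul_le (by omega : (0:Int) < d)).mp h3
        linarith
    · rintro ⟨d, t, x, hd, h2, h3, h4, h5, h6, h7⟩
      refine Or.inr ⟨d, ?_, t, x, h2, ?_, h4, h5, h6, h7⟩
      · rw [PySem.List.mem_pyRange_one]
        have h2d : d * 2 ≤ d * t := by nlinarith
        omega
      · exact (PySem.Int.le_floordiv_iff_mul_le (by omega : (0:Int) < d)).mpr (by linarith)
  · -- each base_len iteration adds exactly its candidates
    intro S d hd
    rw [PySem.List.mem_pyRange_one] at hd
    by_cases htm : PySem.Int.floordiv max_len d < 2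
    · rw [if_pos htm]
      constructor
      · exact Or.inl
      · rintro (h | ⟨t, x, h2, h3, _⟩)
        · exact h
        · omega
    · rw [if_neg htm]
      rw [mem_foldl_iff _ (fun x => ∃ t : Int, 2 ≤ t ∧ t ≤ PySem.Int.floordiv max_len d ∧
            y = x * geomS ((10 : Int) ^ d.toNat) t.toNat ∧
            (d * t < max_len ∨ y ≤ max_end)) y]
      · constructor
        · rintro (h | ⟨x, hx, t, h2, h3, h6, h7⟩)
          · exact Or.inl h
          · rw [PySem.List.mem_pyRange_one] at hx
            exact Or.inr ⟨t, x, h2, h3, hx.1, by omega, h6, h7⟩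
        · rintro (h | ⟨t, x, h2, h3, h4, h5, h6, h7⟩)
          · exact Or.inl h
          · exact Or.inr ⟨x, PySem.List.mem_pyRange_one.mpr ⟨h4, by omega⟩, t, h2, h3, h6, h7⟩
      · intro S' x _
        rw [pvInnerT_mem ((10 : Int) ^ d.toNat) max_len d x max_end
              (PySem.Int.floordiv max_len d) (by omega) rfl
              ((PySem.Int.floordiv max_len d + 1 - 2).toNat) 2 rfl (le_refl 2) x
              (by norm_num [geomS]) S' y]

theorem memB (max_end max_len y : Int) :
    y ∈ pvBloop max_end max_len ↔ PGood max_end max_len y := by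
  unfold pvBloop
  rw [mem_foldl_iff _ (fun L => ∃ d x : Int, 1 ≤ d ∧ d * 2 ≤ L ∧ d ∣ L ∧
        (10 : Int) ^ (d - 1).toNat ≤ x ∧ x < (10 : Int) ^ d.toNat ∧
        y = x * PySem.Int.floordiv ((10 : Int) ^ L.toNat - 1) ((10 : Int) ^ d.toNat - 1) ∧
        (L < max_len ∨ y ≤ max_end)) y]
  · constructor
    · rintro (h | ⟨L, hL, d, x, hd, hdL, hdvd, h4, h5, h6, h7⟩)
      · simp [PySem.Set.empty] at h
      · rw [PySem.List.mem_pyRange_one] at hL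
        obtain ⟨t, rfl⟩ := hdvd
        have h2t : 2 ≤ t := by nlinarith
        refine ⟨d, t, x, hd, h2t, by omega, h4, h5, ?_, h7⟩
        rw [h6, rep_eq d t hd (by omega)]
    · rintro ⟨d, t, x, hd, h2, h3, h4, h5, h6, h7⟩
      refine Or.inr ⟨d * t, ?_, d, x, hd, by nlinarith, Dvd.intro t rfl, h4, h5, ?_, h7⟩
      · rw [PySem.List.mem_pyRange_one]
        constructor
        · nlinarith
        · omega
      · rw [rep_eq d t hd (by omega)]; exact h6
  · intro S L hL
    rw [PySem.List.mem_pyRange_one] at hL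
    rw [mem_foldl_iff _ (fun d => PySem.Int.mod L d = 0 ∧ ∃ x : Int,
          (10 : Int) ^ (d - 1).toNat ≤ x ∧ x < (10 : Int) ^ d.toNat ∧
          y = x * PySem.Int.floordiv ((10 : Int) ^ L.toNat - 1) ((10 : Int) ^ d.toNat - 1) ∧
          (L < max_len ∨ y ≤ max_end)) y]
    · constructor
      · rintro (h | ⟨d, hd, hmod, x, h4, h5, h6, h7⟩)
        · exact Or.inl h
        · rw [PySem.List.mem_pyRange_one] at hd
          have hdvd : d ∣ L := (PySem.Int.mod_eq_zero_iff_dvd L d).mp hmod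
          have hd2 : d * 2 ≤ L :=
            (PySem.Int.le_floordiv_iff_mul_le (by norm_num : (0:Int) < 2)).mp (by omega)
          exact Or.inr ⟨d, x, hd.1, hd2, hdvd, h4, h5, h6, h7⟩
      · rintro (h | ⟨d, x, hd, hd2, hdvd, h4, h5, h6, h7⟩)
        · exact Or.inl h
        · refine Or.inr ⟨d, ?_, (PySem.Int.mod_eq_zero_iff_dvd L d).mpr hdvd, x, h4, h5, h6, h7⟩
          rw [PySem.List.mem_pyRange_one]
          have := (PySem.Int.le_floordiv_iff_mul_le (by norm_num : (0:Int) < 2)).mpr hd2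
          omega
    · intro S' d hd
      rw [PySem.List.mem_pyRange_one] at hd
      by_cases hmod : PySem.Int.mod L d = 0
      · rw [if_pos hmod]
        rw [mem_foldl_iff _ (fun x =>
              y = x * PySem.Int.floordiv ((10 : Int) ^ L.toNat - 1) ((10 : Int) ^ d.toNat - 1) ∧
              (L < max_len ∨ y ≤ max_end)) y]
        · constructor
          · rintro (h | ⟨x, hx, h6, h7⟩)
            · exact Or.inl h
            · rw [PySem.List.mem_pyRange_one] at hx
              exact Or.inr ⟨hmod, x, hx.1, hx.2, h6, h7⟩
          · rintro (h | ⟨_, x, h4, h5, h6, h7⟩)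
            · exact Or.inl h
            · exact Or.inr ⟨x, PySem.List.mem_pyRange_one.mpr ⟨h4, h5⟩, h6, h7⟩
        · intro S'' x _
          by_cases hc : L < max_len ∨ x * PySem.Int.floordiv ((10 : Int) ^ L.toNat - 1)
              ((10 : Int) ^ d.toNat - 1) ≤ max_end
          · rw [if_pos hc, PySem.Set.mem_add]
            constructor
            · rintro (h | h)
              · exact Or.inl h
              · refine Or.inr ⟨h, ?_⟩
                rcases hc with hc | hc
                · exact Or.inl hc
                · exact Or.inr (h ▸ hc)
            · rintro (h | ⟨h6, _⟩)
              · exact Or.inl h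
              · exact Or.inr h6
          · rw [if_neg hc]
            constructor
            · exact Or.inl
            · rintro (h | ⟨h6, h7⟩)
              · exact h
              · exact absurd (by rw [← h6] at hc; exact h7) (by rw [← h6] at hc; exact hc)
      · rw [if_neg hmod]
        constructor
        · exact Or.inl
        · rintro (h | ⟨h1, _⟩)
          · exact h
          · exact absurd h1 hmod

theorem pvAloop_nodup (max_end max_len : Int) : (pvAloop max_end max_len).Nodup := by
  unfold pvAloop
  apply nodup_foldl
  · intro S d hS
    dsimp only
    split_ifs
    · exact hS
    · apply nodup_foldl
      · intro S' x hS'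
        exact pvInnerT_nodup _ _ _ _ _ _ _ _ hS'
      · exact hS
  · simp [PySem.Set.empty]

theorem pvBloop_nodup (max_end max_len : Int) : (pvBloop max_end max_len).Nodup := by
  unfold pvBloop
  apply nodup_foldl
  · intro S L hS
    dsimp only
    apply nodup_foldl
    · intro S' d hS'
      dsimp only
      split_ifs
      · apply nodup_foldl
        · intro S'' x hS''
          dsimp only
          split_ifs
          · exact PySem.Set.nodup_add _ _ hS''
          · exact hS''
        · exact hS'
      · exact hS'
    · exact hS
  · simp [PySem.Set.empty]

-- ===== VERDICT (by name: the statement is the Claim_ definition above) =====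
theorem generate_invalid_ids_spec : Claim_equal_generate_invalid_ids := by
  intro max_end _
  unfold Spec_generate_invalid_ids generate_invalid_ids generate_invalid_ids_alt
  rw [PySem.List.sorted_id_eq_sorted_id_iff_perm]
  rw [List.perm_ext_iff_of_nodup (pvAloop_nodup _ _) (pvBloop_nodup _ _)]
  intro a
  rw [memA, memB]
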